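-- pv_equiv track=rewrite | github.com/Clear-Top/Python_CodingTest | PCCP/3회 (유전법칙)/유전법칙 (성공).py | get_gene
-- ===== SOURCE A (Python) =====
-- def get_gene(query):
--     # n_times: 세대를 거쳐올라갈때 나누는 횟수
--     # m_times: 나눠지는 수
--     n_times, m_times = query
--     m_times = m_times - 1
--     # 3세대면 2번나눔
--     # 4세대면 3번나눔
--     modula = []
--     while n_times > 1:
--         n_times -= 1
--         modula.append(m_times % 4)
--         m_times //= 4
--
--     while modula:
--         mo = modula.pop()
--         if mo == 0:
--             return "RR"
--         elif mo == 3: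
--             return "rr"
--     return "Rr"
-- ===== SOURCE B (Python) =====
-- def get_gene(query):
--     n_times, m_times = query
--     positions = n_times - 1
--     if positions <= 0:
--         return "Rr"
--     x = m_times - 1
--     p = 4 ** (positions - 1)
--     while p >= 1:
--         digit = x // p % 4
--         if digit == 0:
--             return "RR"
--         if digit == 3:
--             return "rr"
--         p //= 4
--     return "Rr"
-- ===== Notes on version B (the rewrite author's own statement) =====
-- stated objective: faster
-- what changed: B scans the base-4 digits of m-1 most-significant-first with a running power of 4 and returns at the first decisive digit, instead of A's two-phase build-the-whole-LSB-digit-list-then-pop-from-the-end; no list is ever materialised.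
import Mathlib
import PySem

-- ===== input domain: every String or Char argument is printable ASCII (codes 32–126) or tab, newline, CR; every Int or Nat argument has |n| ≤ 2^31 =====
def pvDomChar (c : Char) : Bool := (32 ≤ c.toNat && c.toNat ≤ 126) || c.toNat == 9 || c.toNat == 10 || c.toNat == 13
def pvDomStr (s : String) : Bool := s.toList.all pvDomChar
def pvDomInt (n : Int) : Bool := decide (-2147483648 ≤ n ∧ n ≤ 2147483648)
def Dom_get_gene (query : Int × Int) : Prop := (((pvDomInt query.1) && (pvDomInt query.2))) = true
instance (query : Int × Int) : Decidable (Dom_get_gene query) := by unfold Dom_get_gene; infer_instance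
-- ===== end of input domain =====

-- B replaces A's build-an-LSB-digit-list-then-pop scan by a direct most-significant-first
-- digit scan with a running power of 4 (alternative decomposition; return value only).

-- ===== PORT A =====
-- first while loop of A: build modula (LSB-first base-4 digits of m_times)
def geneLoopA (n m : Int) (modula : List Int) : List Int :=
  if n > 1 then
    geneLoopA (n - 1) (PySem.Int.floordiv m 4) (modula ++ [PySem.Int.mod m 4])
  else modula
termination_by n.toNat
decreasing_by omega

-- second while loop of A: pop from the end of modula
def genePopA (modula : List Int) : String :=
  match modula with
  | [] => "Rr"
  | a :: l =>
    let mo := (a :: l).getLast!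
    if mo = 0 then "RR"
    else if mo = 3 then "rr"
    else genePopA (a :: l).dropLast
termination_by modula.length
decreasing_by simp

def get_gene (query : Int × Int) : String :=
  genePopA (geneLoopA query.1 (query.2 - 1) [])

-- ===== PORT B =====
-- while p >= 1 loop of Source B
def geneScanB (x p : Int) : String :=
  if p ≥ 1 then
    let digit := PySem.Int.mod (PySem.Int.floordiv x p) 4
    if digit = 0 then "RR"
    else if digit = 3 then "rr"
    else geneScanB x (PySem.Int.floordiv p 4)
  else "Rr"
termination_by p.toNat
decreasing_by
  have : PySem.Int.floordiv p 4 = p / 4 := PySem.Int.floordiv_eq_ediv_of_pos (by omega)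
  rw [this]; omega

def get_gene_alt (query : Int × Int) : String :=
  if query.1 - 1 ≤ 0 then "Rr"
  else geneScanB (query.2 - 1) (4 ^ (query.1 - 2).toNat)

-- ===== PRECONDITION & SPEC =====
def Spec_get_gene (query : Int × Int) (out : String) : Prop := out = get_gene_alt query
instance (query : Int × Int) (out : String) : Decidable (Spec_get_gene query out) := by unfold Spec_get_gene; infer_instance

-- ===== CLAIM (what is proved, stated in full; the proofs are below) =====
def Claim_equal_get_gene : Prop := ∀ (query : Int × Int), Dom_get_gene query → Spec_get_gene query (get_gene query)

-- ===== LEMMAS AND PROOFS =====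

-- mathematical skeleton of A's first loop: k LSB-first base-4 digits of x
def digitsF (x : Int) : Nat → List Int
  | 0 => []
  | k + 1 => PySem.Int.mod x 4 :: digitsF (PySem.Int.floordiv x 4) k

theorem geneLoopA_eq (k : Nat) : ∀ (n m : Int) (acc : List Int), (n - 1).toNat = k →
    geneLoopA n m acc = acc ++ digitsF m k := by
  induction k with
  | zero =>
    intro n m acc h
    rw [geneLoopA]
    simp [digitsF, show ¬ n > 1 by omega]
  | succ k ih =>
    intro n m acc h
    rw [geneLoopA, if_pos (by omega), ih (n - 1) _ _ (by omega)]
    simp [digitsF]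

theorem fdiv_fdiv (x : Int) (k : Nat) :
    PySem.Int.floordiv (PySem.Int.floordiv x 4) (4 ^ k) = PySem.Int.floordiv x (4 ^ (k + 1)) := by
  rw [PySem.Int.floordiv_eq_ediv_of_pos (b := 4) (by omega),
      PySem.Int.floordiv_eq_ediv_of_pos (by positivity),
      PySem.Int.floordiv_eq_ediv_of_pos (by positivity),
      Int.ediv_ediv_of_nonneg (by omega)]
  ring_nf

-- the (k+1)-digit list is the k-digit list with the top digit of x concatenated
theorem digitsF_succ (x : Int) (k : Nat) :
    digitsF x (k + 1) = digitsF x k ++ [PySem.Int.mod (PySem.Int.floordiv x (4 ^ k)) 4] := by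
  induction k generalizing x with
  | zero =>
    simp [digitsF]
  | succ k ih =>
    calc digitsF x (k + 1 + 1)
        = PySem.Int.mod x 4 :: digitsF (PySem.Int.floordiv x 4) (k + 1) := rfl
      _ = PySem.Int.mod x 4 :: (digitsF (PySem.Int.floordiv x 4) k ++
            [PySem.Int.mod (PySem.Int.floordiv (PySem.Int.floordiv x 4) (4 ^ k)) 4]) := by rw [ih]
      _ = digitsF x (k + 1) ++ [PySem.Int.mod (PySem.Int.floordiv x (4 ^ (k + 1))) 4] := by
          rw [fdiv_fdiv]; rfl

-- one pop step of A's second loop on a nonempty list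
theorem genePopA_concat (l : List Int) (a : Int) :
    genePopA (l ++ [a]) = if a = 0 then "RR" else if a = 3 then "rr" else genePopA l := by
  cases h : l ++ [a] with
  | nil => simp at h
  | cons b t =>
    have hg : (b :: t).getLast! = a := by rw [← h]; simp
    have hd : (b :: t).dropLast = l := by rw [← h]; simp
    rw [genePopA.eq_def]
    simp only [hg, hd]

theorem pow4_fdiv (k : Nat) :
    PySem.Int.floordiv ((4:Int) ^ (k + 1)) 4 = 4 ^ k := by
  rw [PySem.Int.floordiv_eq_ediv_of_pos (by omega), pow_succ]
  exact Int.mul_ediv_cancel _ (by omega)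

theorem main_scan (k : Nat) : ∀ (x : Int),
    genePopA (digitsF x (k + 1)) = geneScanB x (4 ^ k) := by
  induction k with
  | zero =>
    intro x
    rw [digitsF_succ, genePopA_concat, geneScanB]
    have h1 : PySem.Int.floordiv (1:Int) 4 = 0 := by decide
    simp only [digitsF, pow_zero, if_pos (le_refl (1:Int)), h1]
    split_ifs <;> simp_all [genePopA, geneScanB]
  | succ k ih =>
    intro x
    rw [digitsF_succ, genePopA_concat, geneScanB,
        if_pos (show (1:Int) ≤ 4 ^ (k+1) from one_le_pow₀ (by omega)), pow4_fdiv, ih]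

-- ===== VERDICT (by name: the statement is the Claim_ definition above) =====
theorem get_gene_spec : Claim_equal_get_gene := by
  intro query _
  unfold Spec_get_gene get_gene get_gene_alt
  by_cases h : query.1 - 1 ≤ 0
  · rw [if_pos h, geneLoopA_eq 0 query.1 (query.2 - 1) [] (by omega)]
    simp [digitsF, genePopA]
  · rw [if_neg h, geneLoopA_eq ((query.1 - 2).toNat + 1) query.1 (query.2 - 1) [] (by omega)]
    simpa using main_scan (query.1 - 2).toNat (query.2 - 1)
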